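-- pv_equiv track=rewrite | github.com/pypi-data/pypi-mirror-389 | packages/spec-driver/spec_driver-0.4.5-py3-none-any.whl/supekku/scripts/lib/docs/python/comments.py | _find_comment_start
-- ===== SOURCE A (Python) =====
-- def _find_comment_start(line: str) -> int | None:
--   """Find the position of # that starts a comment (not inside quotes)."""
--   in_single_quote = False
--   in_double_quote = False
--   escaped = False
--
--   for i, char in enumerate(line):
--     if escaped:
--       escaped = False
--       continue
--
--     if char == "\\":
--       escaped = True
--       continue
--
--     if char == "'" and not in_double_quote:
--       in_single_quote = not in_single_quote
--     elif char == '"' and not in_single_quote: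
--       in_double_quote = not in_double_quote
--     elif char == "#" and not in_single_quote and not in_double_quote:
--       return i
--
--   return None
-- ===== SOURCE B (Python) =====
-- def _find_comment_start(line: str) -> int | None:
--   """Find the position of # that starts a comment (not inside quotes)."""
--   n = len(line)
--   i = 0
--   while i < n:
--     c = line[i]
--     if c == "\\":
--       i += 2  # skip escaped character
--     elif c == "'" or c == '"':
--       # consume the whole quoted literal as one unit
--       i += 1
--       while i < n:
--         d = line[i]
--         if d == "\\":
--           i += 2
--         elif d == c:
--           i += 1
--           break
--         else:
--           i += 1
--     elif c == "#":
--       return i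
--     else:
--       i += 1
--   return None
-- ===== Notes on version B (the rewrite author's own statement) =====
-- stated objective: alternative
-- what changed: Replaces the per-character enumerate loop with three boolean flags by an index-based while loop that skips escaped characters by jumping the index and consumes each quoted literal as a whole span in an inner loop, returning at the first unquoted comment character.
import Mathlib
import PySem

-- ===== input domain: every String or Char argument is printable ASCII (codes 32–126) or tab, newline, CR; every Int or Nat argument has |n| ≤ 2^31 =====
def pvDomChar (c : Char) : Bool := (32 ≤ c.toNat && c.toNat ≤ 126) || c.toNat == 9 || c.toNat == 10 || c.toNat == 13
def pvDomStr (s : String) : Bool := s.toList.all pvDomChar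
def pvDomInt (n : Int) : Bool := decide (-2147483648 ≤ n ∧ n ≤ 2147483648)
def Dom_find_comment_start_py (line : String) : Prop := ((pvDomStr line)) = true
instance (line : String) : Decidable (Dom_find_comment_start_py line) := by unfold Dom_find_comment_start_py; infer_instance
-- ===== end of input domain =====

-- B replaces A's per-character flag-toggling loop by an index loop that consumes quoted spans whole; same result, same cost (alternative decomposition).

-- ===== PORT A =====
-- A's for-loop over enumerate(line) with state (in_single_quote, in_double_quote, escaped),
-- as structural recursion over the character list with index i.
def fcsAGo : List Char → Int → Bool → Bool → Bool → Option Int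
  | [], _, _, _, _ => none
  | c :: rest, i, inS, inD, esc =>
    if esc then fcsAGo rest (i + 1) inS inD false
    else if c = '\\' then fcsAGo rest (i + 1) inS inD true
    else if c = '\'' ∧ inD = false then fcsAGo rest (i + 1) (!inS) inD false
    else if c = '"' ∧ inS = false then fcsAGo rest (i + 1) inS (!inD) false
    else if c = '#' ∧ inS = false ∧ inD = false then some i
    else fcsAGo rest (i + 1) inS inD false

def find_comment_start_py (line : String) : Option Int :=
  fcsAGo line.toList 0 false false false

-- ===== PORT B =====
-- B's outer while loop (fcsBGo) and inner quote-consuming loop (fcsBIn, q = opening quote),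
-- as mutual recursion over the character list with index i; 'i += 2' drops two chars.
mutual
def fcsBGo : List Char → Int → Option Int
  | [], _ => none
  | c :: rest, i =>
    if c = '\\' then
      match rest with
      | [] => none
      | _ :: rest' => fcsBGo rest' (i + 2)
    else if c = '\'' ∨ c = '"' then fcsBIn c rest (i + 1)
    else if c = '#' then some i
    else fcsBGo rest (i + 1)

def fcsBIn : Char → List Char → Int → Option Int
  | _, [], _ => none
  | q, d :: rest, i =>
    if d = '\\' then
      match rest with
      | [] => none
      | _ :: rest' => fcsBIn q rest' (i + 2)
    else if d = q then fcsBGo rest (i + 1)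
    else fcsBIn q rest (i + 1)
end

def find_comment_start_py_alt (line : String) : Option Int :=
  fcsBGo line.toList 0

-- ===== PRECONDITION & SPEC =====
def Spec_find_comment_start_py (line : String) (out : Option Int) : Prop := out = find_comment_start_py_alt line
instance (line : String) (out : Option Int) : Decidable (Spec_find_comment_start_py line out) := by unfold Spec_find_comment_start_py; infer_instance

-- ===== CLAIM (what is proved, stated in full; the proofs are below) =====
def Claim_equal_find_comment_start_py : Prop := ∀ (line : String), Dom_find_comment_start_py line → Spec_find_comment_start_py line (find_comment_start_py line)

-- ===== LEMMAS AND PROOFS =====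

-- unfolding equations for the mutual well-founded definitions
theorem fcsBGo_nil (i : Int) : fcsBGo [] i = none := by rw [fcsBGo.eq_def]
theorem fcsBIn_nil (q : Char) (i : Int) : fcsBIn q [] i = none := by rw [fcsBIn.eq_def]
theorem fcsBGo_cons (c : Char) (rest : List Char) (i : Int) :
    fcsBGo (c :: rest) i =
      if c = '\\' then
        (match rest with
         | [] => none
         | _ :: rest' => fcsBGo rest' (i + 2))
      else if c = '\'' ∨ c = '"' then fcsBIn c rest (i + 1)
      else if c = '#' then some i
      else fcsBGo rest (i + 1) := by rw [fcsBGo.eq_def]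
theorem fcsBIn_cons (q d : Char) (rest : List Char) (i : Int) :
    fcsBIn q (d :: rest) i =
      if d = '\\' then
        (match rest with
         | [] => none
         | _ :: rest' => fcsBIn q rest' (i + 2))
      else if d = q then fcsBGo rest (i + 1)
      else fcsBIn q rest (i + 1) := by rw [fcsBIn.eq_def]

-- A in the neutral state equals B's outer loop; A inside a quote equals B's inner loop.
theorem fcs_key : ∀ n (cs : List Char), cs.length ≤ n → ∀ i : Int,
    fcsAGo cs i false false false = fcsBGo cs i ∧
    fcsAGo cs i true false false = fcsBIn '\'' cs i ∧
    fcsAGo cs i false true false = fcsBIn '"' cs i := by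
  intro n
  induction n with
  | zero =>
    intro cs h i
    match cs, h with
    | [], _ => simp [fcsAGo, fcsBGo_nil, fcsBIn_nil]
  | succ n ih =>
    intro cs h i
    match cs with
    | [] => simp [fcsAGo, fcsBGo_nil, fcsBIn_nil]
    | c :: rest =>
      simp only [List.length_cons, Nat.succ_le_succ_iff] at h
      by_cases hb : c = '\\'
      · subst hb
        match rest with
        | [] => simp [fcsAGo, fcsBGo_cons, fcsBIn_cons]
        | d :: rest' =>
          have ih' := ih rest' (by simpa using Nat.le_of_succ_le h) (i + 2)
          have e2 : i + 1 + 1 = i + 2 := by ring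
          simp [fcsAGo, fcsBGo_cons, fcsBIn_cons, e2, ih'.1, ih'.2.1, ih'.2.2]
      · have ih' := ih rest h (i + 1)
        by_cases hs : c = '\''
        · subst hs
          simp [fcsAGo, fcsBGo_cons, fcsBIn_cons, ih'.1, ih'.2.1, ih'.2.2]
        · by_cases hd : c = '"'
          · subst hd
            simp [fcsAGo, fcsBGo_cons, fcsBIn_cons, ih'.1, ih'.2.1, ih'.2.2]
          · by_cases hh : c = '#'
            · subst hh
              simp [fcsAGo, fcsBGo_cons, fcsBIn_cons, ih'.2.1, ih'.2.2]
            · simp [fcsAGo, fcsBGo_cons, fcsBIn_cons, hb, hs, hd, hh, ih'.1, ih'.2.1, ih'.2.2]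

-- ===== VERDICT (by name: the statement is the Claim_ definition above) =====
theorem find_comment_start_py_spec : Claim_equal_find_comment_start_py := by
  intro line _
  unfold Spec_find_comment_start_py find_comment_start_py find_comment_start_py_alt
  exact (fcs_key line.toList.length line.toList le_rfl 0).1
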